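-- pv_equiv track=rewrite | github.com/landoty/ACM-Programming-Club | reverse_eng/wb_encr.py | isSecret
-- ===== SOURCE A (Python) =====
-- def isSecret(guessString) -> bool:
--     secretBytes = [0x4a, 0x69, 0x70, 0x7a, 0x60, 0x39, 0x54, 0x7a, 0x5a, 0x71, 0x70, 0x7a, 0x72, 0x7c, 0x77]
--     userBytes = []
--     if(len(guessString) != len(secretBytes)):
--         return(0)
--     else:
--         for i in range(0, len(guessString)):
--             magic = (int(guessString[i].encode("utf-8").hex(), 16) ^ 25)
--             userBytes.append(magic)
--             if(userBytes[i]==(int(secretBytes[i]))):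
--                 if((i == len(guessString)-1)):
--                     return(1)
--             else:
--                 return(0)
-- ===== SOURCE B (Python) =====
-- def isSecret(guessString) -> bool:
--     secretBytes = [0x4a, 0x69, 0x70, 0x7a, 0x60, 0x39, 0x54, 0x7a, 0x5a, 0x71, 0x70, 0x7a, 0x72, 0x7c, 0x77]
--     expected = "".join(chr(b ^ 25) for b in secretBytes)
--     return 1 if guessString == expected else 0
-- ===== Notes on version B (the rewrite author's own statement) =====
-- stated objective: simpler
-- what changed: B decodes the XOR-25 secret once into the expected plaintext string and replaces the per-character encode/xor/compare loop (and the length guard) with a single string equality test.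
import Mathlib
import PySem

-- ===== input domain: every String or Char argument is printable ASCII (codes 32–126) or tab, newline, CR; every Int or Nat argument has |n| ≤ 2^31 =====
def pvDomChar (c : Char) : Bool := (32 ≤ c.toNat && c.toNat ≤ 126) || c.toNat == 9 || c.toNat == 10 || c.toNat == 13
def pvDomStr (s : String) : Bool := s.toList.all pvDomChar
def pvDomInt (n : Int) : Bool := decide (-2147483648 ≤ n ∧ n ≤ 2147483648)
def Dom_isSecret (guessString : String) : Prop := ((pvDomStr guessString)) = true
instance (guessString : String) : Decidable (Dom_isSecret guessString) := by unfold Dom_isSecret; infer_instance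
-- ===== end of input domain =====

-- B decodes the secret once and compares whole strings instead of A's per-character xor-and-compare loop.

-- ===== PORT A =====
-- the loop 'for i in range(0, len(guessString))' with its early returns, as structural recursion on i
def isSecretGo (gl : List Char) (secret : List Int) (userBytes : List Int) (i : Nat) : Int :=
  if h : i < gl.length then
    -- magic = int(guessString[i].encode("utf-8").hex(), 16) ^ 25 = code point ^ 25 (exact: Dom chars are single-byte ASCII);
    -- userBytes.append(magic), then userBytes[i] and secretBytes[i] are read (in range here, so getD's default is never used)
    if (userBytes ++ [PySem.Int.bxor (Int.ofNat (gl[i].toNat)) 25]).getD i 0 = secret.getD i 0 then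
      if i = gl.length - 1 then 1
      else isSecretGo gl secret (userBytes ++ [PySem.Int.bxor (Int.ofNat (gl[i].toNat)) 25]) (i + 1)
    else 0
  else 0  -- unreachable fall-through (Python's implicit None); never hit when gl is nonempty
termination_by gl.length - i

def isSecret (guessString : String) : Int :=
  let secretBytes : List Int := [0x4a, 0x69, 0x70, 0x7a, 0x60, 0x39, 0x54, 0x7a, 0x5a, 0x71, 0x70, 0x7a, 0x72, 0x7c, 0x77]
  if guessString.toList.length ≠ secretBytes.length then 0
  else isSecretGo guessString.toList secretBytes [] 0

-- ===== PORT B =====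
def isSecret_alt (guessString : String) : Int :=
  let secretBytes : List Int := [0x4a, 0x69, 0x70, 0x7a, 0x60, 0x39, 0x54, 0x7a, 0x5a, 0x71, 0x70, 0x7a, 0x72, 0x7c, 0x77]
  let expected : List Char := secretBytes.map (fun b => Char.ofNat (PySem.Int.bxor b 25).toNat)
  if guessString.toList = expected then 1 else 0

-- ===== PRECONDITION & SPEC =====
def Spec_isSecret (guessString : String) (out : Int) : Prop := out = isSecret_alt guessString
instance (guessString : String) (out : Int) : Decidable (Spec_isSecret guessString out) := by unfold Spec_isSecret; infer_instance

-- ===== CLAIM (what is proved, stated in full; the proofs are below) =====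
def Claim_equal_isSecret : Prop := ∀ (guessString : String), Dom_isSecret guessString → Spec_isSecret guessString (isSecret guessString)

-- ===== LEMMAS AND PROOFS =====

def pvEnc (c : Char) : Int := PySem.Int.bxor (Int.ofNat c.toNat) 25

theorem pvEnc_inj : Function.Injective pvEnc := by
  intro a b h
  unfold pvEnc at h
  have h25 : (25 : Int) = ((25 : Nat) : Int) := rfl
  simp only [h25, Int.ofNat_eq_natCast, PySem.Int.bxor_natCast] at h
  have : a.toNat ^^^ 25 = b.toNat ^^^ 25 := by exact_mod_cast h
  have : a.toNat = b.toNat := by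
    have := congrArg (· ^^^ 25) this
    simpa [Nat.xor_assoc] using this
  have hv : a.val.toNat = b.val.toNat := this
  exact Char.ext (UInt32.toNat_inj.mp hv)

theorem isSecretGo_eq (gl : List Char) (secret : List Int) (ub : List Int) (i : Nat)
    (hlen : secret.length = gl.length) (hub : ub.length = i) (hi : i < gl.length) :
    isSecretGo gl secret ub i =
      (if (gl.drop i).map pvEnc = secret.drop i then 1 else 0) := by
  have his : i < secret.length := by omega
  rw [isSecretGo, dif_pos hi]
  have hub' : (ub ++ [PySem.Int.bxor (Int.ofNat (gl[i].toNat)) 25]).getD i 0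
      = PySem.Int.bxor (Int.ofNat (gl[i].toNat)) 25 := by
    simp [List.getD, hub]
  have hsec : secret.getD i 0 = secret[i] := by
    simp [List.getD, List.getElem?_eq_getElem his]
  rw [hub', hsec, List.drop_eq_getElem_cons hi, List.drop_eq_getElem_cons his, List.map_cons]
  by_cases hm : pvEnc gl[i] = secret[i]
  · rw [if_pos (by simpa [pvEnc] using hm)]
    by_cases hlast : i = gl.length - 1
    · rw [if_pos hlast]
      have h1 : gl.drop (i + 1) = [] := List.drop_eq_nil_of_le (by omega)
      have h2 : secret.drop (i + 1) = [] := List.drop_eq_nil_of_le (by omega)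
      simp [h1, h2, hm]
    · rw [if_neg hlast]
      have hi1 : i + 1 < gl.length := by omega
      rw [isSecretGo_eq gl secret _ (i + 1) hlen (by simp [hub]) hi1]
      have hc : (pvEnc gl[i] :: (gl.drop (i + 1)).map pvEnc = secret[i] :: secret.drop (i + 1))
          ↔ ((gl.drop (i + 1)).map pvEnc = secret.drop (i + 1)) := by
        simp only [List.cons_eq_cons, hm, true_and]
      simp only [hc]
  · rw [if_neg (by simpa [pvEnc] using hm)]
    have : ¬ (pvEnc gl[i] :: (gl.drop (i + 1)).map pvEnc = secret[i] :: secret.drop (i + 1)) :=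
      fun hcc => hm (List.cons_eq_cons.mp hcc).1
    rw [if_neg this]
termination_by gl.length - i

def pvSecret : List Int := [0x4a, 0x69, 0x70, 0x7a, 0x60, 0x39, 0x54, 0x7a, 0x5a, 0x71, 0x70, 0x7a, 0x72, 0x7c, 0x77]

def pvExpected : List Char := pvSecret.map (fun b => Char.ofNat (PySem.Int.bxor b 25).toNat)

theorem pvRoundTrip : pvExpected.map pvEnc = pvSecret := by decide

theorem pvKey (gl : List Char) : (gl.map pvEnc = pvSecret) ↔ (gl = pvExpected) := by
  constructor
  · intro h
    exact List.map_injective_iff.mpr pvEnc_inj (h.trans pvRoundTrip.symm)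
  · intro h
    rw [h, pvRoundTrip]

theorem isSecret_spec : Claim_equal_isSecret := by
  intro g _
  show isSecret g = isSecret_alt g
  have hA : isSecret g = if g.toList.length ≠ 15 then 0 else isSecretGo g.toList pvSecret [] 0 := rfl
  have hB : isSecret_alt g = if g.toList = pvExpected then 1 else 0 := rfl
  by_cases hl : g.toList.length = 15
  · rw [hA, if_neg (by simp [hl]), hB]
    rw [isSecretGo_eq g.toList pvSecret [] 0 (by simp [hl, pvSecret]) rfl (by omega)]
    simp only [List.drop_zero]
    simp only [pvKey]
  · rw [hA, if_pos hl, hB,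
      if_neg (fun he => hl (by rw [he]; rfl))]
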